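-- pv_equiv track=rewrite | github.com/alantao5056/USACO_Silver | 2016/January/angry/angry.py | getMinR
-- ===== SOURCE A (Python) =====
-- def checkIfOK(cows, N, K, P):
--   count = 1
--   actualRange = P * 2
--   curRange = cows[0] + actualRange
--   for i in range(1, N):
--     if cows[i] > curRange:
--       curRange = cows[i] + actualRange
--       count += 1
--
--   return count <= K
--
-- def getMinR(cows, N, K, start, end):
--   if start >= end:
--     if not checkIfOK(cows, N, K, start):
--       return start + 1
--     return start
--   mid = (end - start) // 2 + start
--
--   ifValidMid = checkIfOK(cows, N, K, mid)
--
--   if ifValidMid: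
--     return getMinR(cows, N, K, start, mid - 1)
--   else:
--     return getMinR(cows, N, K, mid + 1, end)
-- ===== SOURCE B (Python) =====
-- def _groups(cows, N, P):
--     r = P * 2
--     count = 1
--     reach = cows[0] + r
--     i = 1
--     while i < N:
--         if cows[i] > reach:
--             count += 1
--             reach = cows[i] + r
--         i += 1
--     return count
--
-- def getMinR(cows, N, K, start, end):
--     while start < end:
--         mid = (end - start) // 2 + start
--         if _groups(cows, N, mid) <= K:
--             end = mid - 1
--         else:
--             start = mid + 1
--     return start if _groups(cows, N, start) <= K else start + 1
-- ===== Notes on version B (the rewrite author's own statement) =====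
-- stated objective: idiomatic
-- what changed: The tail recursion of getMinR is replaced by an iterative while-loop binary search with a single post-loop check, and the boolean coverage test is refactored into a group-counting helper whose count is compared against K at the call sites.
import Mathlib
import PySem

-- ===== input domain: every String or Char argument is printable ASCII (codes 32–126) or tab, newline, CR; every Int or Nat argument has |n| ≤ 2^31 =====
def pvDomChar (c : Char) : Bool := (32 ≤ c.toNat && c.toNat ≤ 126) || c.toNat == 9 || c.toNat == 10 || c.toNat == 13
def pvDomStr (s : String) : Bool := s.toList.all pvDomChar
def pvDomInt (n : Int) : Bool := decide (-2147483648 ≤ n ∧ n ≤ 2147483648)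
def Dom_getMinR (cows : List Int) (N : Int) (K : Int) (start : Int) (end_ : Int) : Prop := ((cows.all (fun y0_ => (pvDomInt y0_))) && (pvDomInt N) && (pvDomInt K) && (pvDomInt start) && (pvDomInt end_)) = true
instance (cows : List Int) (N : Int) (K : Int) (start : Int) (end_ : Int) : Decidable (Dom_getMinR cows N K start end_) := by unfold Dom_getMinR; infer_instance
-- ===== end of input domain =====

-- B: iterative while-loop binary search with a post-loop check, and a group-counting
-- helper compared against K, instead of A's tail recursion with a boolean checker.
-- (Recursion in both ports is realised structurally over a fuel equal to the measure
-- end_-start resp. N-i; the fuel-exhausted branch is unreachable on the stated fuel.)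
-- ===== PORT A =====
def checkIfOK (cows : List Int) (N : Int) (K : Int) (P : Int) : Bool :=
  let actualRange := P * 2
  let st := (PySem.List.pyRange 1 N 1).foldl
    (fun (st : Int × Int) i =>
      if PySem.List.pyGetD cows i 0 > st.2 then
        (st.1 + 1, PySem.List.pyGetD cows i 0 + actualRange)
      else st)
    (1, PySem.List.pyGetD cows 0 0 + actualRange)
  decide (st.1 ≤ K)

def getMinRGo (cows : List Int) (N : Int) (K : Int) : Nat → Int → Int → Int
  | 0, start, _end_ =>
    if ¬ checkIfOK cows N K start then start + 1 else start
  | fuel + 1, start, end_ =>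
    if start ≥ end_ then
      if ¬ checkIfOK cows N K start then start + 1 else start
    else
      let mid := PySem.Int.floordiv (end_ - start) 2 + start
      if checkIfOK cows N K mid then getMinRGo cows N K fuel start (mid - 1)
      else getMinRGo cows N K fuel (mid + 1) end_

def getMinR (cows : List Int) (N : Int) (K : Int) (start : Int) (end_ : Int) : Int :=
  getMinRGo cows N K (end_ - start).toNat start end_

-- ===== PORT B =====
def groupsGo (cows : List Int) (N : Int) (r : Int) : Nat → Int → Int → Int → Int
  | 0, _i, count, _reach => count
  | fuel + 1, i, count, reach =>
    if i < N then
      if PySem.List.pyGetD cows i 0 > reach then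
        groupsGo cows N r fuel (i + 1) (count + 1) (PySem.List.pyGetD cows i 0 + r)
      else
        groupsGo cows N r fuel (i + 1) count reach
    else count

def groups (cows : List Int) (N : Int) (P : Int) : Int :=
  groupsGo cows N (P * 2) (N - 1).toNat 1 1 (PySem.List.pyGetD cows 0 0 + P * 2)

def bsLoopGo (cows : List Int) (N : Int) (K : Int) : Nat → Int → Int → Int
  | 0, start, _end_ => start
  | fuel + 1, start, end_ =>
    if start < end_ then
      let mid := PySem.Int.floordiv (end_ - start) 2 + start
      if groups cows N mid ≤ K then bsLoopGo cows N K fuel start (mid - 1)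
      else bsLoopGo cows N K fuel (mid + 1) end_
    else start

def getMinR_alt (cows : List Int) (N : Int) (K : Int) (start : Int) (end_ : Int) : Int :=
  let s := bsLoopGo cows N K (end_ - start).toNat start end_
  if groups cows N s ≤ K then s else s + 1

-- ===== PRECONDITION & SPEC =====
-- Pre_ excludes exactly the inputs on which the Python A raises IndexError:
-- an empty cows list (cows[0]) or N exceeding len(cows) (cows[i] in the loop).
def Pre_getMinR (cows : List Int) (N : Int) (K : Int) (start : Int) (end_ : Int) : Prop :=
  cows ≠ [] ∧ N ≤ (cows.length : Int)
instance (cows : List Int) (N : Int) (K : Int) (start : Int) (end_ : Int) : Decidable (Pre_getMinR cows N K start end_) := by unfold Pre_getMinR; infer_instance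
def pvWitness_getMinR : List Int × Int × Int × Int × Int := ([1, 3, 6], 3, 2, 0, 6)

def Spec_getMinR (cows : List Int) (N : Int) (K : Int) (start : Int) (end_ : Int) (out : Int) : Prop := out = getMinR_alt cows N K start end_
instance (cows : List Int) (N : Int) (K : Int) (start : Int) (end_ : Int) (out : Int) : Decidable (Spec_getMinR cows N K start end_ out) := by unfold Spec_getMinR; infer_instance

-- ===== CLAIM (what is proved, stated in full; the proofs are below) =====
def Claim_equal_getMinR : Prop := ∀ (cows : List Int) (N : Int) (K : Int) (start : Int) (end_ : Int), Dom_getMinR cows N K start end_ → Pre_getMinR cows N K start end_ → Spec_getMinR cows N K start end_ (getMinR cows N K start end_)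

-- ===== LEMMAS AND PROOFS =====

-- A's fold over range(1, N), projected to its count component, is B's counting loop.
theorem foldl_eq_groupsGo (cows : List Int) (N r : Int) :
    ∀ (n : Nat) (i c reach : Int), (N - i).toNat = n →
      ((PySem.List.pyRange i N 1).foldl
        (fun (st : Int × Int) j =>
          if PySem.List.pyGetD cows j 0 > st.2 then
            (st.1 + 1, PySem.List.pyGetD cows j 0 + r)
          else st) (c, reach)).1 = groupsGo cows N r n i c reach := by
  intro n
  induction n with
  | zero =>
    intro i c reach h
    rw [PySem.List.pyRange_one_eq_nil (by omega), groupsGo]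
    rfl
  | succ m ih =>
    intro i c reach h
    rw [PySem.List.pyRange_one_cons (by omega), groupsGo]
    simp only [List.foldl_cons, if_pos (by omega : i < N)]
    by_cases hc : PySem.List.pyGetD cows i 0 > reach
    · rw [if_pos hc, if_pos hc]
      exact ih (i + 1) (c + 1) (PySem.List.pyGetD cows i 0 + r) (by omega)
    · rw [if_neg hc, if_neg hc]
      exact ih (i + 1) c reach (by omega)

theorem checkIfOK_eq_groups (cows : List Int) (N K P : Int) :
    checkIfOK cows N K P = decide (groups cows N P ≤ K) := by
  unfold checkIfOK groups
  simp only [foldl_eq_groupsGo cows N (P * 2) (N - 1).toNat 1 1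
        (PySem.List.pyGetD cows 0 0 + P * 2) rfl]

theorem getMinRGo_eq (cows : List Int) (N K : Int) :
    ∀ (fuel : Nat) (start end_ : Int), (end_ - start).toNat ≤ fuel →
      getMinRGo cows N K fuel start end_ =
        (if groups cows N (bsLoopGo cows N K fuel start end_) ≤ K then
           bsLoopGo cows N K fuel start end_
         else bsLoopGo cows N K fuel start end_ + 1) := by
  intro fuel
  induction fuel with
  | zero =>
    intro start end_ h
    rw [getMinRGo, bsLoopGo, checkIfOK_eq_groups]
    by_cases hg : groups cows N start ≤ K
    · simp [hg]
    · simp [hg]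
  | succ m ih =>
    intro start end_ h
    rw [getMinRGo, bsLoopGo]
    by_cases hlt : start < end_
    · rw [if_neg (by omega : ¬ start ≥ end_), if_pos hlt]
      have hmid : PySem.Int.floordiv (end_ - start) 2 = (end_ - start) / 2 := by
        simp only [PySem.Int.floordiv]
        rw [Int.fdiv_eq_ediv, if_pos (Or.inl (by omega : (0:Int) ≤ 2))]
        omega
      simp only [checkIfOK_eq_groups, decide_eq_true_eq]
      by_cases hg : groups cows N (PySem.Int.floordiv (end_ - start) 2 + start) ≤ K
      · simp only [if_pos hg]
        exact ih start (PySem.Int.floordiv (end_ - start) 2 + start - 1) (by rw [hmid]; omega)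
      · simp only [if_neg hg]
        exact ih (PySem.Int.floordiv (end_ - start) 2 + start + 1) end_ (by rw [hmid]; omega)
    · rw [if_pos (by omega : start ≥ end_), if_neg hlt, checkIfOK_eq_groups]
      by_cases hg : groups cows N start ≤ K
      · simp [hg]
      · simp [hg]

-- ===== VERDICT (by name: the statement is the Claim_ definition above) =====
theorem getMinR_spec : Claim_equal_getMinR := by
  intro cows N K start end_ _ _
  unfold Spec_getMinR getMinR getMinR_alt
  exact getMinRGo_eq cows N K (end_ - start).toNat start end_ (le_refl _)
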